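-- pv_equiv track=rewrite | github.com/query-loop/TalentFlow | server/app/utils/llm_extractor.py | _merge_short_lines
-- ===== SOURCE A (Python) =====
-- from typing import List, Dict, Any, Optional, Iterable, Protocol, Tuple
--
-- def _merge_short_lines(lines: List[str]) -> str:
--     buf: List[str] = []
--     acc = ''
--     for line in lines:
--         if len(line) < 60:
--             if acc:
--                 acc += (' ' + line)
--             else:
--                 acc = line
--         else:
--             if acc:
--                 buf.append(acc)
--                 acc = ''
--             buf.append(line)
--     if acc:
--         buf.append(acc)
--     return '\n'.join(buf)
-- ===== SOURCE B (Python) =====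
-- from typing import List
--
-- def _merge_short_lines(lines: List[str]) -> str:
--     # Two-pointer scan: find each maximal run of short lines and join it in one shot.
--     out: List[str] = []
--     i, n = 0, len(lines)
--     while i < n:
--         if len(lines[i]) >= 60:
--             out.append(lines[i])
--             i += 1
--         else:
--             j = i
--             while j < n and len(lines[j]) < 60:
--                 j += 1
--             run = lines[i:j]
--             # leading empty short lines contribute nothing to the paragraph
--             while run and run[0] == '':
--                 run.pop(0)
--             if run:
--                 out.append(' '.join(run))
--             i = j
--     return '\n'.join(out)
-- ===== Notes on version B (the rewrite author's own statement) =====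
-- stated objective: alternative
-- what changed: B replaces A's flat accumulate-and-flush loop over single lines with a two-pointer scan that extracts each maximal run of short lines, drops its leading empty lines and joins the run with ' ' in one shot.
import Mathlib
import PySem

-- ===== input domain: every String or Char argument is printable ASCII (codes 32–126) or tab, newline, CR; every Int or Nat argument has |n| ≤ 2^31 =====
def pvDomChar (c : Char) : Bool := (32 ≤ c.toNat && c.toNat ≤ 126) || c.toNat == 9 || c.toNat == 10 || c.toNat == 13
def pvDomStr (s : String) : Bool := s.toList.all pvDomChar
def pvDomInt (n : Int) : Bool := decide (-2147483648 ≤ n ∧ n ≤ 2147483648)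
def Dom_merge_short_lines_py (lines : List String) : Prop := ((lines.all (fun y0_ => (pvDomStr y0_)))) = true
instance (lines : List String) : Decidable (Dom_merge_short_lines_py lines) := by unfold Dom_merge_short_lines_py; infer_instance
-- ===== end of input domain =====

-- B merges each maximal run of short lines in one shot (two-pointer scan) instead of A's
-- flat accumulate-and-flush loop; same cost, different decomposition (objective: alternative).

-- ===== PORT A =====
-- one iteration of A's for-loop over state (buf, acc)
def mslStep (st : List String × String) (line : String) : List String × String :=
  if PySem.Str.len line < 60 then
    if st.2 ≠ "" then (st.1, st.2 ++ " " ++ line) else (st.1, line)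
  else
    if st.2 ≠ "" then (st.1 ++ [st.2] ++ [line], "") else (st.1 ++ [line], "")

def merge_short_lines_py (lines : List String) : String :=
  let st := lines.foldl mslStep ([], "")
  PySem.Str.join "\n" (if st.2 ≠ "" then st.1 ++ [st.2] else st.1)

-- ===== PORT B =====
def pvShort (s : String) : Bool := PySem.Str.len s < 60

-- the paragraph made from one maximal run of short lines (Source B: drop leading '' then ' '.join)
def pvJoinRun (run : List String) : List String :=
  let r := run.dropWhile (· == "")
  if r.isEmpty then [] else [PySem.Str.join " " r]

-- Source B's outer two-pointer loop: long lines pass through, a maximal short run is joined at once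
def pvAltGo : List String → List String
  | [] => []
  | l :: ls =>
    if pvShort l then
      pvJoinRun (l :: ls.takeWhile pvShort) ++ pvAltGo (ls.dropWhile pvShort)
    else
      l :: pvAltGo ls
  termination_by ls => ls.length
  decreasing_by
    · exact Nat.lt_succ_of_le (List.length_dropWhile_le _ _)
    · exact Nat.lt_succ_self _

def merge_short_lines_py_alt (lines : List String) : String :=
  PySem.Str.join "\n" (pvAltGo lines)

-- ===== PRECONDITION & SPEC =====
def Spec_merge_short_lines_py (lines : List String) (out : String) : Prop := out = merge_short_lines_py_alt lines
instance (lines : List String) (out : String) : Decidable (Spec_merge_short_lines_py lines out) := by unfold Spec_merge_short_lines_py; infer_instance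

-- ===== CLAIM (what is proved, stated in full; the proofs are below) =====
def Claim_equal_merge_short_lines_py : Prop := ∀ (lines : List String), Dom_merge_short_lines_py lines → Spec_merge_short_lines_py lines (merge_short_lines_py lines)

-- ===== LEMMAS AND PROOFS =====

theorem pvAltGo_nil : pvAltGo [] = [] := by rw [pvAltGo.eq_def]

theorem pvAltGo_cons (l : String) (ls : List String) : pvAltGo (l :: ls) =
    if pvShort l then pvJoinRun (l :: ls.takeWhile pvShort) ++ pvAltGo (ls.dropWhile pvShort)
    else l :: pvAltGo ls := by rw [pvAltGo.eq_def]

-- A's accumulator rule folded over a whole list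
def pvMerge (a : String) (l : String) : String := if a ≠ "" then a ++ " " ++ l else l
def pvMergeAcc (a : String) (g : List String) : String := g.foldl pvMerge a
def pvEmit (a : String) : List String := if a ≠ "" then [a] else []
-- A's buffer after running the loop from accumulator a and flushing
def pvAbuf (a : String) (ls : List String) : List String :=
  let st := ls.foldl mslStep ([], a)
  if st.2 ≠ "" then st.1 ++ [st.2] else st.1

theorem pvStepPrefix (buf : List String) (a l : String) :
    mslStep (buf, a) l = (buf ++ (mslStep ([], a) l).1, (mslStep ([], a) l).2) := by
  simp only [mslStep]
  split_ifs <;> simp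

theorem pvFoldPrefix (ls : List String) (buf : List String) (a : String) :
    ls.foldl mslStep (buf, a) =
      (buf ++ (ls.foldl mslStep ([], a)).1, (ls.foldl mslStep ([], a)).2) := by
  induction ls generalizing buf a with
  | nil => simp
  | cons l t ih =>
    simp only [List.foldl_cons]
    rcases hms : mslStep ([], a) l with ⟨d, a'⟩
    rw [pvStepPrefix buf a l, hms]
    simp only
    rw [ih (buf ++ d) a', ih d a']
    simp [List.append_assoc]

theorem pvAbuf_nil (a : String) : pvAbuf a [] = pvEmit a := rfl

theorem pvAbuf_cons_short (a l : String) (ls : List String) (h : PySem.Str.len l < 60) :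
    pvAbuf a (l :: ls) = pvAbuf (pvMerge a l) ls := by
  simp only [pvAbuf, List.foldl_cons, mslStep, pvMerge, h, if_pos]
  by_cases ha : a ≠ "" <;> simp [ha]

theorem pvAbuf_cons_long (a l : String) (ls : List String) (h : ¬ PySem.Str.len l < 60) :
    pvAbuf a (l :: ls) = pvEmit a ++ [l] ++ pvAbuf "" ls := by
  simp only [pvAbuf, List.foldl_cons, mslStep]
  rw [if_neg h]
  by_cases ha : a ≠ ""
  · rw [if_pos ha, pvFoldPrefix ls ([] ++ [a] ++ [l]) ""]
    by_cases h2 : (List.foldl mslStep ([], "") ls).2 ≠ "" <;> simp [h2, pvEmit, ha]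
  · rw [if_neg ha, pvFoldPrefix ls ([] ++ [l]) ""]
    by_cases h2 : (List.foldl mslStep ([], "") ls).2 ≠ "" <;> simp [h2, pvEmit, ha]

theorem pvNeAppend (a x : String) : a ++ " " ++ x ≠ "" := by
  intro h
  have h2 := congrArg String.toList h
  simp [String.toList_append] at h2

theorem pvMergeAcc_ne (t : List String) (a : String) (ha : a ≠ "") : pvMergeAcc a t ≠ "" := by
  induction t generalizing a with
  | nil => exact ha
  | cons x xs ih =>
    simp only [pvMergeAcc, List.foldl_cons, pvMerge]
    rw [if_pos ha]
    exact ih _ (pvNeAppend a x)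

theorem pvMergeAcc_join (t : List String) (a : String) (ha : a ≠ "") :
    pvMergeAcc a t = PySem.Str.join " " (a :: t) := by
  induction t generalizing a with
  | nil =>
    apply String.toList_injective
    simp [pvMergeAcc, PySem.Str.toList_join, PySem.Chars.join_singleton]
  | cons x xs ih =>
    simp only [pvMergeAcc, List.foldl_cons, pvMerge]
    rw [if_pos ha]
    rw [show List.foldl pvMerge (a ++ " " ++ x) xs = pvMergeAcc (a ++ " " ++ x) xs from rfl,
        ih _ (pvNeAppend a x)]
    apply String.toList_injective
    cases xs with
    | nil =>
      simp [PySem.Str.toList_join, PySem.Chars.join_singleton, PySem.Chars.join_cons_cons,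
        String.toList_append]
    | cons y ys =>
      simp [PySem.Str.toList_join, PySem.Chars.join_cons_cons, String.toList_append]

theorem pvJoinRun_eq_emit (g : List String) : pvJoinRun g = pvEmit (pvMergeAcc "" g) := by
  induction g with
  | nil => rfl
  | cons h t ih =>
    by_cases hh : h = ""
    · subst hh
      simpa [pvJoinRun, pvMergeAcc, pvMerge, List.dropWhile] using ih
    · have hne : (h == "") = false := by simp [hh]
      have hacc : pvMergeAcc "" (h :: t) = pvMergeAcc h t := by
        simp [pvMergeAcc, pvMerge]
      have hj : pvMergeAcc h t = PySem.Str.join " " (h :: t) := pvMergeAcc_join t h hh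
      have hjne : PySem.Str.join " " (h :: t) ≠ "" := hj ▸ pvMergeAcc_ne t h hh
      rw [hacc, hj]
      simp [pvJoinRun, List.dropWhile, hne, pvEmit, hjne]

-- every list splits as one (possibly empty) short run and the rest
theorem pvAltGo_run (ls : List String) :
    pvAltGo ls = pvEmit (pvMergeAcc "" (ls.takeWhile pvShort)) ++ pvAltGo (ls.dropWhile pvShort) := by
  cases ls with
  | nil => simp [pvAltGo_nil, pvMergeAcc, pvEmit]
  | cons m ms =>
    by_cases hm : pvShort m
    · rw [pvAltGo_cons]
      simp only [List.takeWhile_cons, List.dropWhile_cons, hm, if_pos]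
      rw [pvJoinRun_eq_emit]
    · rw [pvAltGo_cons]
      simp [hm, pvMergeAcc, pvEmit, pvAltGo_cons]

theorem pvMain (ls : List String) (a : String) :
    pvAbuf a ls = pvEmit (pvMergeAcc a (ls.takeWhile pvShort)) ++ pvAltGo (ls.dropWhile pvShort) := by
  induction ls generalizing a with
  | nil => simp [pvAbuf_nil, pvAltGo_nil, pvMergeAcc]
  | cons l t ih =>
    by_cases hs : PySem.Str.len l < 60
    · have hb : pvShort l = true := by simp only [pvShort]; exact decide_eq_true hs
      rw [pvAbuf_cons_short a l t hs]
      simp only [List.takeWhile_cons, List.dropWhile_cons, hb, if_pos]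
      rw [ih (pvMerge a l)]
      rfl
    · have hb : pvShort l = false := by simp only [pvShort]; exact decide_eq_false hs
      have hd : List.dropWhile pvShort (l :: t) = l :: t := by simp [hb]
      have ht : List.takeWhile pvShort (l :: t) = [] := by simp [hb]
      rw [pvAbuf_cons_long a l t hs, ih "", ht, hd, pvAltGo_cons]
      rw [if_neg (by simp [hb])]
      rw [pvAltGo_run t]
      simp [pvMergeAcc, pvEmit]

-- ===== VERDICT (by name: the statement is the Claim_ definition above) =====
theorem merge_short_lines_py_spec : Claim_equal_merge_short_lines_py := by
  intro lines _
  unfold Spec_merge_short_lines_py merge_short_lines_py merge_short_lines_py_alt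
  have hA : (let st := lines.foldl mslStep ([], "");
      PySem.Str.join "\n" (if st.2 ≠ "" then st.1 ++ [st.2] else st.1)) =
      PySem.Str.join "\n" (pvAbuf "" lines) := rfl
  rw [hA, pvMain lines "", ← pvAltGo_run lines]
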